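-- pv_equiv track=rewrite | github.com/Maridan8/Crypto-Price-Prediction | Features/indicators/rsi.py | count_above_candle
-- ===== SOURCE A (Python) =====
-- def count_above_candle(l, period, value):
--     counts = [0] * len(l)
--     for i in range(period, len(l)):
--         count = 0
--         for j in range(i-period, i):
--             if l[j] > value:
--                 count += 1
--         counts[i] = count
--
--     return counts
-- ===== SOURCE B (Python) =====
-- def count_above_candle(l, period, value):
--     # prefix sums of the >value indicator; each window count is a difference of two prefix sums
--     n = len(l)
--     pref = [0]
--     for x in l:
--         pref.append(pref[-1] + (1 if x > value else 0))
--     return [pref[i] - pref[i - period] if 0 <= period <= i else 0 for i in range(n)]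
-- ===== Notes on version B (the rewrite author's own statement) =====
-- stated objective: faster
-- what changed: replaced the nested rescan of each window by one prefix-sum pass over the indicator, so each output entry is a difference of two prefix sums
-- crash fix: when period < -len(l) (and l may be empty) A raises IndexError on the negative counts[i] assignment; B returns the all-zero list of length len(l) there — e.g. on count_above_candle([5], -2, 0): A raises IndexError, B returns [0]
import Mathlib
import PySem

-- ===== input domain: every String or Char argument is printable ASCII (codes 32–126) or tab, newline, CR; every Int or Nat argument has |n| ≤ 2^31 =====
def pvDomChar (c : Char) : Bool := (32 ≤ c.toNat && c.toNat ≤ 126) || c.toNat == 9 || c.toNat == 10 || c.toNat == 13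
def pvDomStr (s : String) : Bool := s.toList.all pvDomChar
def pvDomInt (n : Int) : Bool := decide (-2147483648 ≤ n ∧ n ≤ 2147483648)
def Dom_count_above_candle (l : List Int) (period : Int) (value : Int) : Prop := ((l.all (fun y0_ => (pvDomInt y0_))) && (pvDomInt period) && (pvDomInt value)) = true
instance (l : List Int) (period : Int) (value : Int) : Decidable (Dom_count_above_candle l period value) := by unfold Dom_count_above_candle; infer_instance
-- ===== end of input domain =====

-- B replaces A's rescan of every window by one prefix-sum pass; equal wherever A returns.

-- ===== PORT A =====
def count_above_candle (l : List Int) (period : Int) (value : Int) : List Int :=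
  let counts : List Int := List.replicate l.length 0
  (PySem.List.pyRange period l.length 1).foldl (fun counts i =>
    let count : Int :=
      (PySem.List.pyRange (i - period) i 1).foldl (fun count j =>
        if PySem.List.pyGetD l j 0 > value then count + 1 else count) 0
    PySem.List.pySetD counts i count) counts

-- ===== PORT B =====
def count_above_candle_alt (l : List Int) (period : Int) (value : Int) : List Int :=
  let pref : List Int :=
    l.foldl (fun pref x =>
      pref ++ [PySem.List.pyGetD pref (-1) 0 + (if x > value then 1 else 0)]) [0]
  (PySem.List.pyRange 0 l.length 1).map (fun i =>
    if 0 ≤ period ∧ period ≤ i then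
      PySem.List.pyGetD pref i 0 - PySem.List.pyGetD pref (i - period) 0
    else 0)

-- ===== PRECONDITION & SPEC =====
-- A raises IndexError exactly when period < -len(l): the write counts[i] then uses a
-- negative index below -len(counts). Pre_ admits everything else.
def Pre_count_above_candle (l : List Int) (period : Int) (value : Int) : Prop :=
  -(l.length : Int) ≤ period
instance (l : List Int) (period : Int) (value : Int) : Decidable (Pre_count_above_candle l period value) := by unfold Pre_count_above_candle; infer_instance

def pvWitness_count_above_candle : List Int × Int × Int := ([3, 1, 4, 1, 5], 2, 2)

-- A raises IndexError when period < -len(l); B returns the all-zero list of length len(l) there.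
def Raises_count_above_candle (l : List Int) (period : Int) (value : Int) : Prop :=
  period < -(l.length : Int)
instance (l : List Int) (period : Int) (value : Int) : Decidable (Raises_count_above_candle l period value) := by unfold Raises_count_above_candle; infer_instance
def pvRaiseWitness_count_above_candle : List Int × Int × Int := ([5], -2, 0)
def pvRaiseWitnessOut_count_above_candle : List Int := [0]

def Spec_count_above_candle (l : List Int) (period : Int) (value : Int) (out : List Int) : Prop := out = count_above_candle_alt l period value
instance (l : List Int) (period : Int) (value : Int) (out : List Int) : Decidable (Spec_count_above_candle l period value out) := by unfold Spec_count_above_candle; infer_instance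

-- ===== CLAIM (what is proved, stated in full; the proofs are below) =====
def Claim_equal_count_above_candle : Prop := ∀ (l : List Int) (period : Int) (value : Int), Dom_count_above_candle l period value → Pre_count_above_candle l period value → Spec_count_above_candle l period value (count_above_candle l period value)
def Claim_raises_count_above_candle : Prop := (∀ (l : List Int) (period : Int) (value : Int), Dom_count_above_candle l period value → Raises_count_above_candle l period value → ¬ Pre_count_above_candle l period value) ∧ (Dom_count_above_candle (pvRaiseWitness_count_above_candle.1) (pvRaiseWitness_count_above_candle.2.1) (pvRaiseWitness_count_above_candle.2.2) ∧ Raises_count_above_candle (pvRaiseWitness_count_above_candle.1) (pvRaiseWitness_count_above_candle.2.1) (pvRaiseWitness_count_above_candle.2.2) ∧ count_above_candle_alt (pvRaiseWitness_count_above_candle.1) (pvRaiseWitness_count_above_candle.2.1) (pvRaiseWitness_count_above_candle.2.2) = pvRaiseWitnessOut_count_above_candle)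

-- ===== LEMMAS AND PROOFS =====

def pvCnt (l : List Int) (value : Int) (k : Nat) : Int :=
  ((l.take k).countP (fun x => decide (value < x)) : Int)

theorem pvCnt_succ (l : List Int) (value : Int) (k : Nat) (hk : k < l.length) :
    pvCnt l value (k+1) = pvCnt l value k + (if value < l[k] then 1 else 0) := by
  unfold pvCnt
  rw [List.take_add_one, List.getElem?_eq_getElem hk]
  simp only [Option.toList_some, List.countP_append, List.countP_cons, List.countP_nil]
  by_cases h : value < l[k] <;> simp [h]

-- the prefix list built by B's fold
theorem pref_eq (value : Int) (l : List Int) :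
    l.foldl (fun pref x =>
      pref ++ [PySem.List.pyGetD pref (-1) 0 + (if x > value then 1 else 0)]) [0]
    = (List.range (l.length + 1)).map (fun j => pvCnt l value j) := by
  induction l using List.reverseRecOn with
  | nil => simp [pvCnt]
  | append_singleton l' x ih =>
    rw [List.foldl_append, ih, List.foldl_cons, List.foldl_nil]
    have hlast : (List.range (l'.length + 1)).map (fun j => pvCnt l' value j)
        = ((List.range l'.length).map (fun j => pvCnt l' value j)) ++ [pvCnt l' value l'.length] := by
      rw [List.range_succ, List.map_append]; simp
    rw [hlast, PySem.List.pyGetD_neg_one_append_singleton]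
    have hlen : (l' ++ [x]).length = l'.length + 1 := by simp
    rw [hlen, List.range_succ (n := l'.length + 1), List.map_append]
    have hmap : (List.range (l'.length + 1)).map (fun j => pvCnt (l' ++ [x]) value j)
        = (List.range (l'.length + 1)).map (fun j => pvCnt l' value j) := by
      apply List.map_congr_left
      intro j hj
      rw [List.mem_range] at hj
      unfold pvCnt
      rw [List.take_append_of_le_length (by omega)]
    rw [hmap, hlast]
    have h1 : pvCnt (l' ++ [x]) value (l'.length + 1)
        = pvCnt l' value l'.length + (if x > value then 1 else 0) := by
      unfold pvCnt
      rw [List.take_of_length_le (by simp), List.take_of_length_le (le_refl l'.length)]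
      simp only [List.countP_append, List.countP_cons, List.countP_nil]
      by_cases h : value < x <;> simp [h]
    simp [h1]

-- A's inner loop is a difference of prefix counts
theorem inner_eq (value : Int) (l : List Int) :
    ∀ (m : Nat) (a : Int) (c : Int), 0 ≤ a → a + m ≤ l.length →
    (PySem.List.pyRange a (a + m) 1).foldl
      (fun count j => if PySem.List.pyGetD l j 0 > value then count + 1 else count) c
    = c + pvCnt l value (a + m).toNat - pvCnt l value a.toNat := by
  intro m
  induction m with
  | zero =>
    intro a c ha hle
    simp [PySem.List.pyRange_one]
  | succ m ih =>
    intro a c ha hle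
    have hc : ((m:Int) + 1) = ((m+1 : Nat) : Int) := by push_cast; ring
    rw [← hc] at hle ⊢
    have hcons : PySem.List.pyRange a (a + ((m:Int)+1)) 1
        = a :: PySem.List.pyRange (a+1) (a + ((m:Int)+1)) 1 :=
      PySem.List.pyRange_one_cons (by omega)
    rw [hcons, List.foldl_cons]
    have halen : a.toNat < l.length := by omega
    have hget : PySem.List.pyGetD l a 0 = l[a.toNat] :=
      PySem.List.pyGetD_eq_getElem l 0 ha (by omega)
    have harg : a + ((m:Int)+1) = (a+1) + (m:Int) := by ring
    rw [harg, ih (a+1) _ (by omega) (by omega)]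
    have hsucc : (a+1).toNat = a.toNat + 1 := by omega
    have hstep : pvCnt l value (a+1).toNat
        = pvCnt l value a.toNat + (if value < l[a.toNat] then 1 else 0) := by
      rw [hsucc, pvCnt_succ l value a.toNat halen]
    rw [hget]
    split_ifs at hstep ⊢ with h <;> omega

-- A's outer loop fills positions a..len-1 with F
theorem fill_eq (F : Int → Int) :
    ∀ (m : Nat) (cs : List Int) (a : Int), 0 ≤ a → a + m = cs.length →
    (PySem.List.pyRange a cs.length 1).foldl (fun cs i => PySem.List.pySetD cs i (F i)) cs
    = (List.range cs.length).map (fun (k : Nat) => if a ≤ (k:Int) then F (k:Int) else cs.getD k 0) := by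
  intro m
  induction m with
  | zero =>
    intro cs a ha hlen
    have hnil : PySem.List.pyRange a cs.length 1 = [] := by
      rw [PySem.List.pyRange_one]
      have : ((cs.length : Int) - a).toNat = 0 := by omega
      simp [this]
    rw [hnil, List.foldl_nil]
    apply List.ext_getElem (by simp)
    intro k hk hk'
    simp only [List.length_map, List.length_range] at hk'
    have : ¬ (a ≤ (k:Int)) := by omega
    simp [this, List.getD_eq_getElem?_getD, List.getElem?_eq_getElem hk']
  | succ m ih =>
    intro cs a ha hlen
    have hcons : PySem.List.pyRange a cs.length 1
        = a :: PySem.List.pyRange (a+1) cs.length 1 :=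
      PySem.List.pyRange_one_cons (by omega)
    rw [hcons, List.foldl_cons]
    have hset : PySem.List.pySetD cs a (F a) = cs.set a.toNat (F a) :=
      PySem.List.pySetD_of_nonneg cs (F a) ha
    have hlen2 : (cs.set a.toNat (F a)).length = cs.length := by simp
    rw [hset]
    have hih := ih (cs.set a.toNat (F a)) (a+1) (by omega) (by rw [hlen2]; omega)
    rw [hlen2] at hih
    rw [hih]
    apply List.ext_getElem (by simp)
    intro k hk hk'
    simp only [List.length_map, List.length_range] at hk'
    simp only [List.getElem_map, List.getElem_range]
    by_cases h1 : (a:Int) + 1 ≤ k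
    · have h2 : a ≤ (k:Int) := by omega
      simp [h1, h2]
    · by_cases h2 : (k:Int) = a
      · have hka : k = a.toNat := by omega
        have h3 : a ≤ (k:Int) := by omega
        simp [h1, h3, hka, List.getD_eq_getElem?_getD,
              List.getElem?_eq_getElem (by omega : a.toNat < (cs.set a.toNat (F a)).length),
              List.getElem_set]
        intro _
        congr 1
        omega
      · have h3 : ¬ (a ≤ (k:Int)) := by omega
        simp [h1, h3, List.getD_eq_getElem?_getD,
              List.getElem?_eq_getElem (by omega : k < (cs.set a.toNat (F a)).length),
              List.getElem?_eq_getElem (by omega : k < cs.length), List.getElem_set]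
        omega

-- setting zeros into an all-zero list does nothing
theorem setD_zero_replicate (n : Nat) (r : List Int) (G : Int → Int)
    (hG : ∀ i ∈ r, G i = 0) :
    r.foldl (fun cs i => PySem.List.pySetD cs i (G i)) (List.replicate n 0)
    = List.replicate n 0 := by
  induction r with
  | nil => rfl
  | cons i r ih =>
    rw [List.foldl_cons, hG i (by simp)]
    have hstep : PySem.List.pySetD (List.replicate n (0:Int)) i 0 = List.replicate n 0 := by
      simp only [PySem.List.pySetD, PySem.List.pySet?, PySem.List.pyIdx?]
      split_ifs <;> simp
    rw [hstep]
    exact ih (fun j hj => hG j (by simp [hj]))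

-- B as a map over range
theorem alt_eq (l : List Int) (period value : Int) :
    count_above_candle_alt l period value
    = (List.range l.length).map (fun (k : Nat) =>
        if 0 ≤ period ∧ period ≤ (k:Int) then
          pvCnt l value k - pvCnt l value ((k:Int) - period).toNat
        else 0) := by
  unfold count_above_candle_alt
  rw [pref_eq, PySem.List.pyRange_zero_nat, List.map_map]
  apply List.map_congr_left
  intro k hk
  rw [List.mem_range] at hk
  simp only [Function.comp]
  by_cases hc : 0 ≤ period ∧ period ≤ (k:Int)
  · obtain ⟨h0, hpk⟩ := hc
    have hget1 : PySem.List.pyGetD ((List.range (l.length + 1)).map (fun j => pvCnt l value j)) (k:Int) 0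
        = pvCnt l value k := by
      rw [PySem.List.pyGetD_eq_getElem _ 0 (by omega) (by simp; omega)]
      simp
    have hget2 : PySem.List.pyGetD ((List.range (l.length + 1)).map (fun j => pvCnt l value j)) ((k:Int) - period) 0
        = pvCnt l value ((k:Int) - period).toNat := by
      rw [PySem.List.pyGetD_eq_getElem _ 0 (by omega) (by simp; omega)]
      simp
    simp [h0, hpk, hget1, hget2]
  · simp [hc]

-- zeta-reduced form of port A (definitional)
theorem A_unfold (l : List Int) (period value : Int) :
    count_above_candle l period value
    = (PySem.List.pyRange period (l.length : Int) 1).foldl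
        (fun counts i => PySem.List.pySetD counts i
          ((PySem.List.pyRange (i - period) i 1).foldl
            (fun count j => if PySem.List.pyGetD l j 0 > value then count + 1 else count) 0))
        (List.replicate l.length (0 : Int)) := rfl

-- ===== VERDICT (by name: the statement is the Claim_ definition above) =====
theorem count_above_candle_spec : Claim_equal_count_above_candle := by
  intro l period value _ hpre
  unfold Pre_count_above_candle at hpre
  unfold Spec_count_above_candle
  rw [alt_eq]
  rw [A_unfold]
  by_cases hp : 0 ≤ period
  · by_cases hpn : period ≤ (l.length : Int)
    · -- main case: fill lemma with F the inner fold
      have hcs : ((List.replicate l.length (0:Int)).length : Int) = (l.length : Int) := by simp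
      rw [show ((l.length : Int)) = ((List.replicate l.length (0:Int)).length : Int) from by simp]
      rw [fill_eq _ (l.length - period.toNat) _ period hp (by simp; omega)]
      apply List.ext_getElem (by simp)
      intro k hk hk'
      simp only [List.length_map, List.length_range, List.length_replicate] at hk hk'
      simp only [List.getElem_map, List.getElem_range]
      by_cases h1 : period ≤ (k:Int)
      · have h2 : 0 ≤ period ∧ period ≤ (k:Int) := ⟨hp, h1⟩
        simp only [h1, h2, if_true, if_pos]
        have := inner_eq value l period.toNat ((k:Int) - period) 0 (by omega) (by omega)
        have harg : (k:Int) - period + (period.toNat : Int) = (k:Int) := by omega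
        rw [harg] at this
        rw [this]
        simp
      · have h2 : ¬ (0 ≤ period ∧ period ≤ (k:Int)) := by tauto
        simp [h1, h2, List.getD_eq_getElem?_getD, List.getElem?_replicate, hk]
    · -- period > len(l): the outer range is empty, both sides all-zero
      have hnil : PySem.List.pyRange period (l.length : Int) 1 = [] := by
        rw [PySem.List.pyRange_one]
        have : ((l.length : Int) - period).toNat = 0 := by omega
        simp [this]
      rw [hnil, List.foldl_nil]
      apply List.ext_getElem (by simp)
      intro k hk hk'
      simp only [List.length_replicate] at hk
      have h2 : ¬ (0 ≤ period ∧ period ≤ (k:Int)) := by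
        rintro ⟨_, h⟩; omega
      simp [h2, hk]
  · -- negative period: every window is empty, both sides all-zero
    have hA : (PySem.List.pyRange period (l.length : Int) 1).foldl
        (fun counts i => PySem.List.pySetD counts i
          ((PySem.List.pyRange (i - period) i 1).foldl
            (fun count j => if PySem.List.pyGetD l j 0 > value then count + 1 else count) 0))
        (List.replicate l.length (0:Int))
      = List.replicate l.length (0:Int) := by
      apply setD_zero_replicate
      intro i _
      have : PySem.List.pyRange (i - period) i 1 = [] := by
        rw [PySem.List.pyRange_one]
        simp
        omega
      rw [this, List.foldl_nil]
    rw [hA]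
    apply List.ext_getElem (by simp)
    intro k hk hk'
    simp only [List.length_replicate] at hk
    have h2 : ¬ (0 ≤ period ∧ period ≤ (k:Int)) := by rintro ⟨h, _⟩; omega
    simp [h2, hk]

theorem count_above_candle_raises : Claim_raises_count_above_candle := by
  unfold Claim_raises_count_above_candle
  exact ⟨by intro l p v _ h hp; unfold Raises_count_above_candle at h; unfold Pre_count_above_candle at hp; omega, by decide⟩

-- self-check: B's port indeed returns the stated value at the raise witness
theorem pvRaiseOut_witness : count_above_candle_alt pvRaiseWitness_count_above_candle.1 pvRaiseWitness_count_above_candle.2.1 pvRaiseWitness_count_above_candle.2.2 = pvRaiseWitnessOut_count_above_candle := count_above_candle_raises.2.2.2
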